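-- pv_equiv track=rewrite | github.com/yohelperez/tienda-abarrotes | main.py | pbraCEtiqueta
-- ===== SOURCE A (Python) =====
-- def pbraCEtiqueta(etiqueta, pbraetiqueta):
--     ''' recibe la etiqueta y la palabra con su etiqueta
--     devuelve un string con la palabra con su etiqueta de cierre'''
--     i = 1
--     etiqueta = etiqueta.split('<')
--     for elemento in etiqueta:
--         if i != 1:
--             pbraetiqueta += '</' + elemento
--         else:
--             i +=1
--     return pbraetiqueta
--
-- i = 1
-- ===== SOURCE B (Python) =====
-- def pbraCEtiqueta(etiqueta, pbraetiqueta):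
--     ''' recibe la etiqueta y la palabra con su etiqueta
--     devuelve un string con la palabra con su etiqueta de cierre'''
--     idx = etiqueta.find('<')
--     if idx == -1:
--         return pbraetiqueta
--     return pbraetiqueta + etiqueta[idx:].replace('<', '</')
-- ===== Notes on version B (the rewrite author's own statement) =====
-- stated objective: simpler
-- what changed: Replaces the split-into-list plus counter-guarded append loop with a direct find of the first '<', a slice from there and one str.replace of '<' by '</'.
import Mathlib
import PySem

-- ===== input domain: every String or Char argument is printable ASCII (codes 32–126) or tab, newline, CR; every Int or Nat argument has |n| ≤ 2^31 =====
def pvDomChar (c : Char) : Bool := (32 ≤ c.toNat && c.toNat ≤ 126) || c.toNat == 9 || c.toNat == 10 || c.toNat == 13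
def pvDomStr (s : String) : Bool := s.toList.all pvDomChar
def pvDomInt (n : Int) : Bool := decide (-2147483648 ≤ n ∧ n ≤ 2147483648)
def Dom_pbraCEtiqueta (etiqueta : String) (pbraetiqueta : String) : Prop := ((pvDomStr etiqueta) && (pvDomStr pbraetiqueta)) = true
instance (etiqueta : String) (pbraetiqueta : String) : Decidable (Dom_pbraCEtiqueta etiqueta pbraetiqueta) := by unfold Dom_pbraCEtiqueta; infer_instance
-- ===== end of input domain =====

-- B replaces A's split-into-list plus counter-guarded append loop by find + slice + one replace of '<' with '</' (objective: simpler).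

-- ===== PORT A =====
-- split on '<', then append '</' + piece for every piece except the first (i-counter guard)
def pbraCEtiqueta (etiqueta : String) (pbraetiqueta : String) : String :=
  let pieces := (PySem.Str.split? etiqueta "<").getD []   -- sep "<" ≠ "", so split? is never none
  (pieces.foldl
    (fun (st : Int × String) elemento =>
      if st.1 ≠ 1 then (st.1, st.2 ++ "</" ++ elemento) else (st.1 + 1, st.2))
    ((1 : Int), pbraetiqueta)).2

-- ===== PORT B =====
-- idx = etiqueta.find('<'); if idx == -1: return pbraetiqueta; else pbraetiqueta + etiqueta[idx:].replace('<','</')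
def pbraCEtiqueta_alt (etiqueta : String) (pbraetiqueta : String) : String :=
  let idx := PySem.Str.find etiqueta "<"
  if idx = -1 then pbraetiqueta
  else pbraetiqueta ++ PySem.Str.replace (PySem.Str.slice etiqueta (some idx) none) "<" "</"

-- ===== PRECONDITION & SPEC =====
def Spec_pbraCEtiqueta (etiqueta : String) (pbraetiqueta : String) (out : String) : Prop := out = pbraCEtiqueta_alt etiqueta pbraetiqueta
instance (etiqueta : String) (pbraetiqueta : String) (out : String) : Decidable (Spec_pbraCEtiqueta etiqueta pbraetiqueta out) := by unfold Spec_pbraCEtiqueta; infer_instance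

-- ===== CLAIM (what is proved, stated in full; the proofs are below) =====
def Claim_equal_pbraCEtiqueta : Prop := ∀ (etiqueta : String) (pbraetiqueta : String), Dom_pbraCEtiqueta etiqueta pbraetiqueta → Spec_pbraCEtiqueta etiqueta pbraetiqueta (pbraCEtiqueta etiqueta pbraetiqueta)

-- ===== LEMMAS AND PROOFS =====

theorem toList_lt : ("<" : String).toList = ['<'] := by decide

theorem toList_ltslash : ("</" : String).toList = ['<', '/'] := by decide

-- reference splitter: mySplit pre cs = the pieces of (pre ++ cs) split on '<' (pre = chars read since the last cut)
def mySplit : List Char → List Char → List (List Char)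
  | pre, [] => [pre]
  | pre, c :: t => if c = '<' then pre :: mySplit [] t else mySplit (pre ++ [c]) t

-- reference replacer: each '<' becomes "</"
def myRep : List Char → List Char
  | [] => []
  | c :: t => if c = '<' then '<' :: '/' :: myRep t else c :: myRep t

-- reference finder: index of the first '<'
def myFind : List Char → Option Nat
  | [] => none
  | c :: t => if c = '<' then some 0 else (myFind t).map (· + 1)

theorem splitOn_go_char (fuel : Nat) : ∀ (l cur : List Char) (accs : List (List Char)),
    l.length ≤ fuel →
    PySem.Chars.splitOn.go ['<'] fuel l cur accs = accs.reverse ++ mySplit cur.reverse l := by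
  induction fuel with
  | zero =>
    intro l cur accs h
    have hl : l = [] := List.eq_nil_of_length_eq_zero (Nat.le_zero.mp h)
    subst hl
    simp [PySem.Chars.splitOn.go, mySplit]
  | succ n ih =>
    intro l cur accs h
    cases l with
    | nil => simp [PySem.Chars.splitOn.go, mySplit]
    | cons c t =>
      by_cases hc : c = '<'
      · subst hc
        have hpre : List.isPrefixOf ['<'] ('<' :: t) = true := by simp [List.isPrefixOf]
        simp only [List.length_cons, Nat.succ_le_succ_iff] at h
        simp only [PySem.Chars.splitOn.go, hpre]
        simp only [if_true]
        rw [show List.drop (['<'].length) ('<' :: t) = t from by simp]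
        rw [ih t [] (cur.reverse :: accs) h]
        simp [mySplit]
      · have hpre : List.isPrefixOf ['<'] (c :: t) = false := by
          simp [List.isPrefixOf]
          intro hh
          exact absurd hh.symm hc
        simp only [List.length_cons, Nat.succ_le_succ_iff] at h
        simp only [PySem.Chars.splitOn.go, hpre]
        simp only [Bool.false_eq_true, if_false]
        rw [ih t (c :: cur) accs h]
        simp [mySplit, hc]

theorem splitOn_char (cs : List Char) :
    PySem.Chars.splitOn cs ['<'] = mySplit [] cs := by
  have := splitOn_go_char (cs.length + 1) cs [] [] (by omega)
  simpa [PySem.Chars.splitOn] using this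

theorem replace_go_char (fuel : Nat) : ∀ (l acc : List Char),
    l.length ≤ fuel →
    PySem.Chars.replace.go ['<'] ['<', '/'] fuel l acc = acc.reverse ++ myRep l := by
  induction fuel with
  | zero =>
    intro l acc h
    have hl : l = [] := List.eq_nil_of_length_eq_zero (Nat.le_zero.mp h)
    subst hl
    simp [PySem.Chars.replace.go, myRep]
  | succ n ih =>
    intro l acc h
    cases l with
    | nil => simp [PySem.Chars.replace.go, myRep]
    | cons c t =>
      by_cases hc : c = '<'
      · subst hc
        have hpre : List.isPrefixOf ['<'] ('<' :: t) = true := by simp [List.isPrefixOf]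
        simp only [List.length_cons, Nat.succ_le_succ_iff] at h
        simp only [PySem.Chars.replace.go, hpre]
        simp only [if_true]
        rw [show List.drop (['<'].length) ('<' :: t) = t from by simp]
        rw [ih t _ h]
        simp [myRep]
      · have hpre : List.isPrefixOf ['<'] (c :: t) = false := by
          simp [List.isPrefixOf]
          intro hh
          exact absurd hh.symm hc
        simp only [List.length_cons, Nat.succ_le_succ_iff] at h
        simp only [PySem.Chars.replace.go, hpre]
        simp only [Bool.false_eq_true, if_false]
        rw [ih t (c :: acc) h]
        simp [myRep, hc]

theorem replace_char (cs : List Char) :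
    PySem.Chars.replace cs ['<'] ['<', '/'] = myRep cs := by
  have := replace_go_char cs.length cs [] (le_refl _)
  simpa [PySem.Chars.replace] using this

theorem find_go_char (l : List Char) : ∀ (k : Nat),
    PySem.Chars.find.go ['<'] l k =
      (match myFind l with | none => (-1 : Int) | some i => (k : Int) + i) := by
  induction l with
  | nil => intro k; simp [PySem.Chars.find.go, myFind]
  | cons c t ih =>
    intro k
    by_cases hc : c = '<'
    · subst hc
      simp [PySem.Chars.find.go, List.isPrefixOf, myFind]
    · have hpre : List.isPrefixOf ['<'] (c :: t) = false := by
        simp [List.isPrefixOf]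
        intro hh
        exact absurd hh.symm hc
      simp only [PySem.Chars.find.go, hpre]
      simp only [Bool.false_eq_true, if_false]
      rw [ih (k + 1)]
      cases hm : myFind t with
      | none => simp [myFind, hc, hm]
      | some i => simp [myFind, hc, hm]; ring_nf

theorem find_char (cs : List Char) :
    PySem.Chars.find cs ['<'] =
      (match myFind cs with | none => (-1 : Int) | some i => (i : Int)) := by
  have := find_go_char cs 0
  simpa [PySem.Chars.find] using this

theorem mySplit_tail (cs : List Char) : ∀ pre, (mySplit pre cs).tail = (mySplit [] cs).tail := by
  induction cs with
  | nil => intro pre; simp [mySplit]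
  | cons c t ih =>
    intro pre
    by_cases hc : c = '<'
    · simp [mySplit, hc]
    · simp only [mySplit, hc, if_false]
      rw [ih (pre ++ [c]), ih ([] ++ [c])]

theorem mySplit_flatMap (cs : List Char) : ∀ pre,
    (mySplit pre cs).flatMap (fun pc => '<' :: '/' :: pc) = '<' :: '/' :: (pre ++ myRep cs) := by
  induction cs with
  | nil => intro pre; simp [mySplit, myRep]
  | cons c t ih =>
    intro pre
    by_cases hc : c = '<'
    · simp [mySplit, myRep, hc, ih []]
    · simp only [mySplit, myRep, hc, if_false]
      rw [ih (pre ++ [c])]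
      simp

theorem mySplit_tail_flatMap (cs : List Char) :
    (mySplit [] cs).tail.flatMap (fun pc => '<' :: '/' :: pc) =
      (match myFind cs with | none => [] | some i => myRep (cs.drop i)) := by
  induction cs with
  | nil => simp [mySplit, myFind]
  | cons c t ih =>
    by_cases hc : c = '<'
    · subst hc
      rw [show mySplit [] ('<' :: t) = [] :: mySplit [] t from by simp [mySplit]]
      rw [List.tail_cons, mySplit_flatMap t []]
      simp [myFind, myRep]
    · simp only [mySplit, myFind, hc, if_false]
      rw [mySplit_tail t ([] ++ [c])]
      rw [ih]
      cases hm : myFind t with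
      | none => simp
      | some i => simp

theorem mySplit_ne_nil (cs : List Char) : ∀ pre, mySplit pre cs ≠ [] := by
  induction cs with
  | nil => intro pre; simp [mySplit]
  | cons c t ih =>
    intro pre
    by_cases hc : c = '<'
    · simp [mySplit, hc]
    · simp only [mySplit, hc, if_false]
      exact ih (pre ++ [c])

theorem foldl_step (ps : List String) : ∀ (j : Int) (p : String), j ≠ 1 →
    ((ps.foldl
        (fun (st : Int × String) elemento =>
          if st.1 ≠ 1 then (st.1, st.2 ++ "</" ++ elemento) else (st.1 + 1, st.2))
        (j, p)).2).toList
      = p.toList ++ (ps.map String.toList).flatMap (fun pc => '<' :: '/' :: pc) := by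
  induction ps with
  | nil => intro j p h; simp
  | cons e rest ih =>
    intro j p h
    simp only [List.foldl_cons, if_pos h]
    rw [ih j (p ++ "</" ++ e) h]
    simp [toList_ltslash]

theorem split_lt (e : String) :
    PySem.Str.split? e "<" = some ((mySplit [] e.toList).map String.ofList) := by
  simp [PySem.Str.split?, PySem.Chars.split?, toList_lt, splitOn_char]

-- ===== VERDICT (by name: the statement is the Claim_ definition above) =====
theorem pbraCEtiqueta_spec : Claim_equal_pbraCEtiqueta := by
  intro e p _
  unfold Spec_pbraCEtiqueta pbraCEtiqueta pbraCEtiqueta_alt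
  simp only [split_lt, Option.getD_some, PySem.Str.find_eq, toList_lt, find_char]
  apply String.toList_inj.mp
  cases hms : mySplit [] e.toList with
  | nil => exact absurd hms (mySplit_ne_nil e.toList [])
  | cons m0 mtail =>
    have htail : (mySplit [] e.toList).tail = mtail := by rw [hms]; rfl
    simp only [List.map_cons, List.foldl_cons]
    rw [if_neg (by simp : ¬ ((1 : Int) ≠ 1))]
    have hfold := foldl_step (mtail.map String.ofList) (1 + 1) p (by norm_num)
    rw [hfold]
    have hmt : (mtail.map String.ofList).map String.toList = mtail := by
      simp only [List.map_map, Function.comp_def, String.toList_ofList, List.map_id']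
    rw [hmt]
    have hmain := mySplit_tail_flatMap e.toList
    rw [htail] at hmain
    rw [hmain]
    cases hm : myFind e.toList with
    | none =>
      simp
    | some i =>
      have hne : ((i : Int) = -1) = False := by
        simp only [eq_iff_iff, iff_false]
        omega
      simp only [hne, if_false]
      simp only [String.toList_append, PySem.Str.toList_replace, PySem.Str.toList_slice,
        PySem.Chars.slice_eq_listSlice, toList_lt, toList_ltslash]
      rw [PySem.List.slice_from e.toList (by omega : (0 : Int) ≤ (i : Int))]
      rw [replace_char]
      simp
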